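-- pv_equiv track=rewrite | github.com/nccgroup/Splunking-Crime | Splunk_ML_Toolkit/bin/splunklite/conf.py | readConfLines
-- ===== SOURCE A (Python) =====
-- import collections
--
-- def readConfLines(lines, ordered=False):
--     """
--     takes a list of lines in conf file format, and splits them into dictionary
--     (of stanzas), each of which is a dictionary of key values.
--     the passed list of strings can come either from the simple file open foo in
--     readConfFile, or the snazzier output of popen("btool foo list")
--
--     N.B.:  To aid in ease-of-use with writeConfFile(), the implementation
--            retains any stanza names, keys, or values that have been escaped
--            in their escaped form.
--     """
--     dict_type = collections.OrderedDict if ordered else dict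
--     currStanza = "default"
--     settings = dict_type({currStanza: dict_type()})
--
--     # line is of the form key = value where multi-line value is combined by '\n'
--     for line in lines:
--         l = line.strip()
--         if l.startswith("#"): continue
--         if l.startswith('['):
--             stanza = l.lstrip('[')
--             endLoc = stanza.rfind(']')
--             if endLoc >= 0:
--                 stanza = stanza[:endLoc]
--             if stanza not in settings:
--                 settings[stanza] = dict_type()
--             currStanza = stanza
--         else:
--             # Key names may include embedded '=' chars as long as they are
--             # escaped appropriately.
--             equalsPos = l.find('=')
--             while equalsPos != -1:
--                 backslashPos = equalsPos - 1
--                 backslashCount = 0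
--                 # Iterate backwards from this '=' for as long as there are
--                 # backslashes.  If there are an odd number, then this '=' char
--                 # is considered escaped.
--                 while backslashPos > -1 and l[backslashPos] == '\\':
--                     backslashPos -= 1
--                     backslashCount += 1
--                 if backslashCount % 2 == 0:
--                     break
--                 equalsPos = l.find('=', equalsPos + 1)
--             # We ignore lines that contain no unescaped '=' chars.
--             if equalsPos != -1:
--                 key = l[:equalsPos].strip()
--                 val = l[equalsPos + 1:].strip()
--                 if val and val[-1] == "\\":
--                     # This could be a multi-line value and strip will get rid \n
--                     # adding back \n to avoid conflating of the 2 settings: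
--                     # SPL-91600
--                     val = "%s\n" % val
--                 settings[currStanza][key] = val
--     return settings
-- ===== SOURCE B (Python) =====
-- import collections
--
-- def readConfLines(lines, ordered=False):
--     """Parse conf-file lines into stanza dicts. Alternative decomposition:
--     each line is first classified into an event (skip / stanza / key-value)
--     by a pure helper, and the key-value split finds the first unescaped '='
--     with a single forward scan instead of repeated rescans with backward
--     backslash counting."""
--     dict_type = collections.OrderedDict if ordered else dict
--     settings = dict_type({"default": dict_type()})
--     curr = "default"
--     for line in lines:
--         ev = _classifyConfLine(line)
--         if ev[0] == "stanza":
--             if ev[1] not in settings: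
--                 settings[ev[1]] = dict_type()
--             curr = ev[1]
--         elif ev[0] == "kv":
--             settings[curr][ev[1]] = ev[2]
--     return settings
--
-- def _classifyConfLine(line):
--     l = line.strip()
--     if l.startswith("#"):
--         return ("skip",)
--     if l.startswith("["):
--         s = l.lstrip("[")
--         end = s.rfind("]")
--         return ("stanza", s[:end] if end >= 0 else s)
--     eq = _firstUnescapedEquals(l)
--     if eq < 0:
--         return ("skip",)
--     key = l[:eq].strip()
--     val = l[eq + 1:].strip()
--     if val.endswith("\\"):
--         # keep the newline a multi-line value would carry (SPL-91600)
--         val += "\n"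
--     return ("kv", key, val)
--
-- def _firstUnescapedEquals(l):
--     # one forward pass: a char is escaped iff the preceding run of
--     # backslashes has odd length
--     escaped = False
--     for i, c in enumerate(l):
--         if escaped:
--             escaped = False
--         elif c == "\\":
--             escaped = True
--         elif c == "=":
--             return i
--     return -1
-- ===== Notes on version B (the rewrite author's own statement) =====
-- stated objective: alternative
-- what changed: The inner 'first unescaped =' search is a single forward scan carrying an 'escaped' flag instead of A's repeated find('=') calls each followed by a backward backslash-counting walk, and the line loop is decomposed into a pure line classifier (skip/stanza/key-value events) plus an interpreter that updates the stanza dicts.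
import Mathlib
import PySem

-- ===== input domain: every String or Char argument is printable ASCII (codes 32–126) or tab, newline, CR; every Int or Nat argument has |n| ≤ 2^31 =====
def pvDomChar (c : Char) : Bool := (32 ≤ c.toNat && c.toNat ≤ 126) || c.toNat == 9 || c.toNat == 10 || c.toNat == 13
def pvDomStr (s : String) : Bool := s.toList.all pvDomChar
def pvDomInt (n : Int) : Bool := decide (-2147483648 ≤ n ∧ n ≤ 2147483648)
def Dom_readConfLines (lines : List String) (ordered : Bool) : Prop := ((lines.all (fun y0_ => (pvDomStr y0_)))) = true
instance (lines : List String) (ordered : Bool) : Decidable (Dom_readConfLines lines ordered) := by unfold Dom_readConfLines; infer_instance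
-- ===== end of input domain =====

-- B replaces A's repeated find-'='-then-walk-backwards-counting-backslashes inner loop by a single
-- forward scan with an 'escaped' flag, and decomposes the line loop into a pure line classifier plus
-- an interpreter (objective: simpler/alternative; same result). The 'ordered' flag selects
-- OrderedDict vs dict in Python — both are insertion-ordered, so both ports model them as the same
-- association list and 'ordered' does not affect the result.

-- ===== PORT A =====
-- backward backslash-counting loop of A: length of the run of '\' ending just before position i
def pvBackCountA (l : List Char) : Nat → Nat
  | 0 => 0
  | i + 1 => if l.getD i ' ' == '\\' then pvBackCountA l i + 1 else 0

-- A's 'while equalsPos != -1' loop (fuel = l.length + 1 bounds the strictly increasing positions)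
def pvFindUnescA (l : List Char) : Nat → Int → Int
  | 0, eqPos => eqPos
  | fuel + 1, eqPos =>
    if eqPos = -1 then -1
    else if pvBackCountA l eqPos.toNat % 2 = 0 then eqPos
    else pvFindUnescA l fuel (PySem.Chars.findFrom l ['='] (eqPos + 1))

def pvStepA (st : PySem.Dict String (PySem.Dict String String) × String) (line : String) :
    PySem.Dict String (PySem.Dict String String) × String :=
  let l := PySem.Chars.strip line.toList
  if PySem.Chars.startswith l ['#'] then st
  else if PySem.Chars.startswith l ['['] then
    -- l.lstrip('[') drops exactly the leading run of '[' characters (exact)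
    let stanza0 := l.dropWhile (fun c => c == '[')
    let endLoc := PySem.Chars.rfind stanza0 [']']
    let stanza := String.ofList (if endLoc ≥ 0 then PySem.List.slice stanza0 none (some endLoc) else stanza0)
    let settings := if (PySem.Dict.get? st.1 stanza).isSome then st.1
                    else PySem.Dict.insert st.1 stanza (PySem.Dict.mk [])
    (settings, stanza)
  else
    let eqPos := pvFindUnescA l (l.length + 1) (PySem.Chars.find l ['='])
    if eqPos = -1 then st
    else
      let key := String.ofList (PySem.Chars.strip (PySem.List.slice l none (some eqPos)))
      let val := PySem.Chars.strip (PySem.List.slice l (some (eqPos + 1)) none)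
      let val := if val ≠ [] && PySem.List.pyGet? val (-1) == some '\\' then val ++ ['\n'] else val
      -- settings[currStanza][key] = val; currStanza is always a key of settings here
      (PySem.Dict.insert st.1 st.2 (PySem.Dict.insert (PySem.Dict.getD st.1 st.2 (PySem.Dict.mk [])) key (String.ofList val)), st.2)

def readConfLines (lines : List String) (ordered : Bool) : List (String × List (String × String)) :=
  ((lines.foldl pvStepA (PySem.Dict.mk [("default", PySem.Dict.mk [])], "default")).1).items.map
    (fun kv => (kv.1, kv.2.items))

-- ===== PORT B =====
inductive PvEvent : Type
  | skip : PvEvent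
  | stanza : String → PvEvent
  | kv : String → String → PvEvent
deriving DecidableEq, Repr

-- one forward pass: a char is escaped iff the preceding run of backslashes has odd length
def pvFindUnescB : List Char → Nat → Bool → Int
  | [], _, _ => -1
  | c :: rest, i, escaped =>
    if escaped then pvFindUnescB rest (i + 1) false
    else if c == '\\' then pvFindUnescB rest (i + 1) true
    else if c == '=' then (i : Int)
    else pvFindUnescB rest (i + 1) false

def pvClassify (line : String) : PvEvent :=
  let l := PySem.Chars.strip line.toList
  if PySem.Chars.startswith l ['#'] then .skip
  else if PySem.Chars.startswith l ['['] then
    -- l.lstrip('[') drops exactly the leading run of '[' characters (exact)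
    let s := l.dropWhile (fun c => c == '[')
    let e := PySem.Chars.rfind s [']']
    .stanza (String.ofList (if e ≥ 0 then PySem.List.slice s none (some e) else s))
  else
    let eq := pvFindUnescB l 0 false
    if eq < 0 then .skip
    else
      let key := PySem.Chars.strip (PySem.List.slice l none (some eq))
      let val := PySem.Chars.strip (PySem.List.slice l (some (eq + 1)) none)
      let val := if PySem.Chars.endswith val ['\\'] then val ++ ['\n'] else val
      .kv (String.ofList key) (String.ofList val)

def pvApply (st : PySem.Dict String (PySem.Dict String String) × String) (ev : PvEvent) :
    PySem.Dict String (PySem.Dict String String) × String :=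
  match ev with
  | .skip => st
  | .stanza s =>
    (if (PySem.Dict.get? st.1 s).isSome then st.1 else PySem.Dict.insert st.1 s (PySem.Dict.mk []), s)
  | .kv k v =>
    (PySem.Dict.insert st.1 st.2 (PySem.Dict.insert (PySem.Dict.getD st.1 st.2 (PySem.Dict.mk [])) k v), st.2)

def readConfLines_alt (lines : List String) (ordered : Bool) : List (String × List (String × String)) :=
  ((lines.foldl (fun st line => pvApply st (pvClassify line))
      (PySem.Dict.mk [("default", PySem.Dict.mk [])], "default")).1).items.map
    (fun kv => (kv.1, kv.2.items))

-- ===== PRECONDITION & SPEC =====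
def Spec_readConfLines (lines : List String) (ordered : Bool) (out : List (String × List (String × String))) : Prop := out = readConfLines_alt lines ordered
instance (lines : List String) (ordered : Bool) (out : List (String × List (String × String))) : Decidable (Spec_readConfLines lines ordered out) := by unfold Spec_readConfLines; infer_instance

-- ===== CLAIM (what is proved, stated in full; the proofs are below) =====
def Claim_equal_readConfLines : Prop := ∀ (lines : List String) (ordered : Bool), Dom_readConfLines lines ordered → Spec_readConfLines lines ordered (readConfLines lines ordered)

-- ===== LEMMAS AND PROOFS =====

-- 'ok l i': position i holds an '=' preceded by an even run of backslashes
def pvOk (l : List Char) (i : Nat) : Bool :=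
  (l.getD i ' ' == '=') && (pvBackCountA l i % 2 == 0)

-- the first position ≥ k satisfying pvOk, as Python index (-1 if none)
def pvFirstOk (l : List Char) (k : Nat) : Int :=
  if h : k < l.length then (if pvOk l k then (k : Int) else pvFirstOk l (k + 1)) else -1
termination_by l.length - k

lemma pvFirstOk_unfold (l : List Char) (k : Nat) :
    pvFirstOk l k = if h : k < l.length then (if pvOk l k then (k : Int) else pvFirstOk l (k + 1)) else -1 := by
  rw [pvFirstOk]

lemma pvFirstOk_ge (l : List Char) (k : Nat) : -1 ≤ pvFirstOk l k := by
  fun_induction pvFirstOk l k with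
  | case1 k _ _ => simp
  | case2 k _ _ ih => exact ih
  | case3 k _ => simp

lemma pvBackCountA_succ (l : List Char) (k : Nat) :
    pvBackCountA l (k + 1) = if l.getD k ' ' == '\\' then pvBackCountA l k + 1 else 0 := rfl

lemma pvFindUnescB_eq (l : List Char) (k : Nat) (hk : k ≤ l.length) :
    pvFindUnescB (l.drop k) k (pvBackCountA l k % 2 == 1) = pvFirstOk l k := by
  fun_induction pvFirstOk l k with
  | case1 k h hok =>
    have hd : l.drop k = l[k] :: l.drop (k + 1) := List.drop_eq_getElem_cons h
    have hget : l.getD k ' ' = l[k] := by rw [List.getD_eq_getElem?_getD, List.getElem?_eq_getElem h]; rfl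
    simp only [pvOk, Bool.and_eq_true, beq_iff_eq] at hok
    obtain ⟨he, hp⟩ := hok
    have hflag : (pvBackCountA l k % 2 == 1) = false := by simp [hp]
    rw [hd]
    simp only [pvFindUnescB, hflag]
    have he' : l[k] = '=' := hget ▸ he
    simp [he']
  | case2 k h hok ih =>
    have hd : l.drop k = l[k] :: l.drop (k + 1) := List.drop_eq_getElem_cons h
    have hget : l.getD k ' ' = l[k] := by rw [List.getD_eq_getElem?_getD, List.getElem?_eq_getElem h]; rfl
    have ih' := ih (by omega)
    rw [hd, ← ih']
    by_cases hp : pvBackCountA l k % 2 = 1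
    · have h2 : pvBackCountA l (k+1) % 2 ≠ 1 := by
        rw [pvBackCountA_succ]; split <;> omega
      have hb1 : (pvBackCountA l k % 2 == 1) = true := by simp [hp]
      have hb2 : (pvBackCountA l (k+1) % 2 == 1) = false := by simp [h2]
      rw [hb1, hb2]
      simp [pvFindUnescB]
    · have h0 : pvBackCountA l k % 2 = 0 := by omega
      by_cases hbs : l[k] = '\\'
      · have h2 : pvBackCountA l (k+1) % 2 = 1 := by
          rw [pvBackCountA_succ, hget, hbs]; simp; omega
        have hb1 : (pvBackCountA l k % 2 == 1) = false := by simp [hp]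
        have hb2 : (pvBackCountA l (k+1) % 2 == 1) = true := by simp [h2]
        rw [hb1, hb2]
        simp [pvFindUnescB, hbs]
      · have hne : l[k] ≠ '=' := by
          intro he
          refine hok ?_
          simp only [pvOk, hget]
          simp [he, h0]
        have h2 : pvBackCountA l (k+1) = 0 := by
          rw [pvBackCountA_succ, hget]; simp [hbs]
        have hb1 : (pvBackCountA l k % 2 == 1) = false := by simp [hp]
        have hb2 : (pvBackCountA l (k+1) % 2 == 1) = false := by simp [h2]
        rw [hb1, hb2]
        simp [pvFindUnescB, hbs, hne]
  | case3 k h =>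
    have hd : l.drop k = [] := List.drop_eq_nil_of_le (by omega)
    rw [hd]
    simp [pvFindUnescB]

lemma pvFirstOk_none (l : List Char) (k : Nat) (hnone : ∀ i, k ≤ i → pvOk l i = false) :
    pvFirstOk l k = -1 := by
  fun_induction pvFirstOk l k with
  | case1 k h hok => exact absurd (hnone k le_rfl) (by simp [hok])
  | case2 k h hok ih => exact ih (fun i hi => hnone i (by omega))
  | case3 k h => rfl

lemma pvFirstOk_ge_len (l : List Char) (k : Nat) (h : l.length ≤ k) : pvFirstOk l k = -1 := by
  rw [pvFirstOk_unfold]; simp; omega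

lemma pvFirstOk_step (l : List Char) (j : Nat) (hok : pvOk l j = false) :
    pvFirstOk l j = pvFirstOk l (j + 1) := by
  rw [pvFirstOk_unfold]
  by_cases h : j < l.length
  · simp [h, hok]
  · rw [pvFirstOk_ge_len l (j + 1) (by omega)]; simp [h]

lemma pvFirstOk_congr (l : List Char) (k j : Nat) (hkj : k ≤ j)
    (hmin : ∀ i, k ≤ i → i < j → pvOk l i = false) : pvFirstOk l k = pvFirstOk l j := by
  induction j, hkj using Nat.le_induction with
  | base => rfl
  | succ j hkj ih =>
    rw [ih (fun i hi hij => hmin i hi (by omega))]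
    exact pvFirstOk_step l j (hmin j hkj (by omega))

lemma pvPrefix_drop (l : List Char) (i : Nat) (c : Char) :
    [c] <+: l.drop i ↔ i < l.length ∧ l.getD i ' ' = c := by
  by_cases h : i < l.length
  · have hget : l.getD i ' ' = l[i] := by
      rw [List.getD_eq_getElem?_getD, List.getElem?_eq_getElem h]; rfl
    rw [List.drop_eq_getElem_cons h, hget, List.cons_prefix_cons]
    constructor
    · rintro ⟨hc, -⟩
      exact ⟨h, hc.symm⟩
    · rintro ⟨-, hc⟩
      exact ⟨hc.symm, List.nil_prefix⟩
  · rw [List.drop_eq_nil_of_le (by omega)]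
    simp [h]

lemma pvOk_not_of_no_infix (l : List Char) (k : Nat)
    (hni : ¬ ['='] <:+: l.drop k) : ∀ i, k ≤ i → pvOk l i = false := by
  intro i hi
  by_contra hcon
  rw [Bool.not_eq_false, pvOk, Bool.and_eq_true, beq_iff_eq] at hcon
  apply hni
  rw [← PySem.Chars.isIn_iff_infix, ← PySem.Chars.exists_prefix_drop_iff_isIn]
  refine ⟨i - k, ?_⟩
  have hik : k + (i - k) = i := by omega
  rw [List.drop_drop, hik, pvPrefix_drop]
  have : i < l.length := by
    by_contra hlen
    have hD : l[i]? = none := List.getElem?_eq_none (by omega)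
    rw [List.getD_eq_getElem?_getD, hD] at hcon
    simp at hcon
  exact ⟨this, hcon.1⟩

lemma pvFindUnescA_eq (fuel : Nat) (l : List Char) (k : Nat) (hk : k ≤ l.length)
    (hf : l.length - k < fuel) :
    pvFindUnescA l fuel (PySem.Chars.findFrom l ['='] (k : Int)) = pvFirstOk l k := by
  induction fuel generalizing k with
  | zero => omega
  | succ fuel ih =>
    by_cases hr : PySem.Chars.findFrom l ['='] (k : Int) = -1
    · have hni := (PySem.Chars.findFrom_natCast_eq_neg_one_iff l ['='] k hk).mp hr
      rw [pvFindUnescA, if_pos hr]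
      exact (pvFirstOk_none l k (pvOk_not_of_no_infix l k hni)).symm
    · obtain ⟨hkr, hpre, hmin⟩ := PySem.Chars.findFrom_natCast_spec l ['='] k hk hr
      set r := PySem.Chars.findFrom l ['='] (k : Int) with hrdef
      have hr0 : (0 : Int) ≤ r := le_trans (by exact_mod_cast Int.natCast_nonneg k) hkr
      set j := r.toNat with hjdef
      have hrj : r = (j : Int) := (Int.toNat_of_nonneg hr0).symm
      obtain ⟨hjlen, hjeq⟩ := (pvPrefix_drop l j '=').mp hpre
      have hkj : k ≤ j := by omega
      have hminOk : ∀ i, k ≤ i → i < j → pvOk l i = false := by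
        intro i hi hij
        by_contra hcon
        rw [Bool.not_eq_false, pvOk, Bool.and_eq_true, beq_iff_eq] at hcon
        refine hmin i hi hij ?_
        rw [pvPrefix_drop]
        have hilen : i < l.length := by omega
        exact ⟨hilen, hcon.1⟩
      rw [pvFindUnescA, if_neg hr]
      by_cases hpar : pvBackCountA l j % 2 = 0
      · rw [if_pos (by rw [← hjdef]; exact hpar)]
        rw [pvFirstOk_congr l k j hkj hminOk, pvFirstOk_unfold, dif_pos hjlen,
          if_pos (by rw [pvOk, hjeq]; simp [hpar])]
        exact hrj
      · rw [if_neg (by rw [← hjdef]; exact hpar)]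
        have hstep : r + 1 = ((j + 1 : Nat) : Int) := by omega
        rw [hstep, ih (j + 1) (by omega) (by omega)]
        rw [pvFirstOk_congr l k (j + 1) (by omega)]
        intro i hi hij
        by_cases hij' : i < j
        · exact hminOk i hi hij'
        · have : i = j := by omega
          subst this
          rw [pvOk]
          simp [hpar]

lemma pvInner_eq (l : List Char) :
    pvFindUnescA l (l.length + 1) (PySem.Chars.find l ['=']) = pvFindUnescB l 0 false := by
  rw [← PySem.Chars.findFrom_zero]
  have hA := pvFindUnescA_eq (l.length + 1) l 0 (Nat.zero_le _) (by omega)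
  have hB := pvFindUnescB_eq l 0 (Nat.zero_le _)
  simpa [pvBackCountA] using hA.trans hB.symm

lemma pvFindUnescB_ge (l : List Char) : -1 ≤ pvFindUnescB l 0 false := by
  have hB := pvFindUnescB_eq l 0 (Nat.zero_le _)
  simp only [List.drop_zero] at hB
  have : (pvBackCountA l 0 % 2 == 1) = false := by simp [pvBackCountA]
  rw [this] at hB
  rw [hB]
  exact pvFirstOk_ge l 0

lemma pvEndswith_backslash (val : List Char) :
    (val ≠ [] && PySem.List.pyGet? val (-1) == some '\\') = PySem.Chars.endswith val ['\\'] := by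
  induction val using List.reverseRecOn with
  | nil => decide
  | append_singleton xs x ih =>
    rw [Bool.eq_iff_iff]
    simp [pysem, PySem.List.pyGet?, PySem.List.pyIdx?, PySem.Chars.endswith_iff]
    rw [← List.reverse_prefix]
    simp [List.cons_prefix_cons]
    exact eq_comm

lemma pvStep_eq (st : PySem.Dict String (PySem.Dict String String) × String) (line : String) :
    pvStepA st line = pvApply st (pvClassify line) := by
  unfold pvStepA pvClassify
  set l := PySem.Chars.strip line.toList with hl
  by_cases h1 : PySem.Chars.startswith l ['#']
  · simp [h1, pvApply]
  by_cases h2 : PySem.Chars.startswith l ['[']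
  · simp [h1, h2, pvApply]
  · simp only [h1, h2, Bool.false_eq_true, if_false]
    rw [pvInner_eq l]
    have hge := pvFindUnescB_ge l
    by_cases hneg : pvFindUnescB l 0 false = -1
    · have hlt : pvFindUnescB l 0 false < 0 := by omega
      rw [if_pos hneg, if_pos hlt]
      rfl
    · have hlt : ¬ pvFindUnescB l 0 false < 0 := by omega
      rw [if_neg hneg, if_neg hlt, pvEndswith_backslash]
      rfl

theorem readConfLines_spec_aux (lines : List String) (ordered : Bool) :
    readConfLines lines ordered = readConfLines_alt lines ordered := by
  unfold readConfLines readConfLines_alt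
  have h : pvStepA = fun st line => pvApply st (pvClassify line) :=
    funext fun st => funext fun line => pvStep_eq st line
  rw [h]

-- ===== VERDICT (by name: the statement is the Claim_ definition above) =====
theorem readConfLines_spec : Claim_equal_readConfLines := by
  intro lines ordered _
  unfold Spec_readConfLines
  exact readConfLines_spec_aux lines ordered
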